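-- pv_equiv track=rewrite | github.com/tom-brash/advent-of-code | 2019/day13/13-2 tk.py | printable_grid
-- ===== SOURCE A (Python) =====
-- def printable_grid(grid):
--     print_chars = {0: ' ', 1: '*', 2: '#', 3: '=', 4: 'o'}
--     printable_grid = ''
--     for row in grid:
--         for i, pixel in enumerate(row):
--             row[i] = print_chars[pixel]
--         printable_grid += (''.join(row))
--         printable_grid += '\n'
--     return printable_grid
-- ===== SOURCE B (Python) =====
-- def printable_grid(grid):
--     # Recursive decomposition: render head row by indexing the tile string
--     # directly (tile ids 0..4 are positions in ' *#=o'), then recurse on the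
--     # rest.  Pure: does not mutate grid (A mutates its rows in place).
--     tiles = ' *#=o'
--     if not grid:
--         return ''
--     head = ''.join(tiles[p] for p in grid[0])
--     return head + '\n' + printable_grid(grid[1:])
-- ===== Notes on version B (the rewrite author's own statement) =====
-- stated objective: alternative
-- what changed: B renders recursively (head row + recurse on the tail) and maps each tile id by indexing directly into the string ' *#=o' instead of A's in-place dict-translation loop with string += accumulation; B is pure and does not mutate grid (return values agree).
import Mathlib
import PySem

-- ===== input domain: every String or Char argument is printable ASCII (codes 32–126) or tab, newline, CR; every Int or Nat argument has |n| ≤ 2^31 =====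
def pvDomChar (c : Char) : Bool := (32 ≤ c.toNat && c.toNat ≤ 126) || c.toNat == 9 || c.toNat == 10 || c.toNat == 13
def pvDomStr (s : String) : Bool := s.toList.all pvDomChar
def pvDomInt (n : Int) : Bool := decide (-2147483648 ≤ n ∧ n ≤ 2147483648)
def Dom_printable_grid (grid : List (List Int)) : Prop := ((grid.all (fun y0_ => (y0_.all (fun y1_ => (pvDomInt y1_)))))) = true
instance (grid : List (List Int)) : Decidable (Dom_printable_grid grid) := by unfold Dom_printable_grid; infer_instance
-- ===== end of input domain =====

-- B renders the grid recursively (head row + recurse on the tail), indexing the tile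
-- string ' *#=o' directly instead of A's in-place dict-translation loop with '+=';
-- equivalence is about the RETURN value only: A mutates grid's rows in place, B does not.

-- ===== PORT A =====
-- the tile-to-char dict of A
def pvPrintChars : PySem.Dict Int String :=
  PySem.Dict.ofList [(0, " "), (1, "*"), (2, "#"), (3, "="), (4, "o")]

def printable_grid (grid : List (List Int)) : String :=
  -- for row in grid: translate row in place via the dict, then '+= ''.join(row)' and '+= "\n"'
  grid.foldl (fun acc row =>
    let row' := row.map (fun pixel => PySem.Dict.getD pvPrintChars pixel "")
    acc ++ PySem.Str.join "" row' ++ "\n") ""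

-- ===== PORT B =====
-- the tile string of B
def pvTiles : String := " *#=o"

def printable_grid_alt : List (List Int) → String
  | [] => ""
  | row :: rest =>
      PySem.Str.join "" (row.map (fun p => String.mk [((PySem.Str.pyGet? pvTiles p).getD ' ')]))
        ++ "\n" ++ printable_grid_alt rest

-- ===== PRECONDITION & SPEC =====
-- Pre_ excludes pixels outside 0..4, on which A raises KeyError in the dict lookup.
def Pre_printable_grid (grid : List (List Int)) : Prop :=
  ∀ row ∈ grid, ∀ p ∈ row, 0 ≤ p ∧ p ≤ 4
instance (grid : List (List Int)) : Decidable (Pre_printable_grid grid) := by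
  unfold Pre_printable_grid; infer_instance
def pvWitness_printable_grid : List (List Int) := [[0, 1, 2], [3, 4]]

def Spec_printable_grid (grid : List (List Int)) (out : String) : Prop := out = printable_grid_alt grid
instance (grid : List (List Int)) (out : String) : Decidable (Spec_printable_grid grid out) := by unfold Spec_printable_grid; infer_instance

-- ===== CLAIM =====
def Claim_equal_printable_grid : Prop := ∀ (grid : List (List Int)), Dom_printable_grid grid → Pre_printable_grid grid → Spec_printable_grid grid (printable_grid grid)

-- ===== LEMMAS AND PROOFS =====
theorem pv_pixel_eq (p : Int) (h0 : 0 ≤ p) (h4 : p ≤ 4) :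
    PySem.Dict.getD pvPrintChars p "" = String.mk [((PySem.Str.pyGet? pvTiles p).getD ' ')] := by
  interval_cases p <;> decide

theorem pv_foldl_eq :
    ∀ (g : List (List Int)) (acc : String), (∀ row ∈ g, ∀ p ∈ row, 0 ≤ p ∧ p ≤ 4) →
      g.foldl (fun acc row =>
          acc ++ PySem.Str.join "" (row.map (fun pixel => PySem.Dict.getD pvPrintChars pixel "")) ++ "\n") acc
        = acc ++ printable_grid_alt g
  | [], acc, _ => by simp [printable_grid_alt]
  | r :: g, acc, h => by
      have hr : r.map (fun pixel => PySem.Dict.getD pvPrintChars pixel "")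
          = r.map (fun p => String.mk [((PySem.Str.pyGet? pvTiles p).getD ' ')]) := by
        apply List.map_congr_left
        intro p hp
        have := h r (by simp) p hp
        exact pv_pixel_eq p this.1 this.2
      rw [List.foldl_cons, pv_foldl_eq g _ (fun row hrow => h row (by simp [hrow])), hr]
      simp [printable_grid_alt, String.append_assoc]

-- ===== VERDICT =====
theorem printable_grid_spec : Claim_equal_printable_grid := by
  intro grid _ hpre
  unfold Spec_printable_grid printable_grid
  rw [pv_foldl_eq grid "" hpre]
  simp
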